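-- pv_equiv track=rewrite | github.com/ziyangwang1992/MyAlgorithms | DecisionTree/tools.py | get_max_label
-- ===== SOURCE A (Python) =====
-- def get_max_label(y):
--     y_dict = {}
--     max_num = -1
--     max_val = y[0]
--     for i in range(len(y)):
--         y_dict[y[i]] = y_dict.get(y[i], 0) + 1
--         if y_dict[y[i]] > max_num:
--             max_num = y_dict[y[i]]
--             max_val = y[i]
--     return max_val
-- ===== SOURCE B (Python) =====
-- def get_max_label(y):
--     # Two-pass: count all labels, take the global max count M,
--     # then return the first label whose running count reaches M
--     # (= the original's first-to-reach-running-max tie-break).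
--     cnt = {}
--     for v in y:
--         cnt[v] = cnt.get(v, 0) + 1
--     M = max(cnt.values())
--     run = {}
--     for v in y:
--         run[v] = run.get(v, 0) + 1
--         if run[v] == M:
--             return v
-- ===== Notes on version B (the rewrite author's own statement) =====
-- stated objective: alternative
-- what changed: Replaces the single pass that tracks a running maximum and best label with two passes: count everything, take the max count M, then return the first label whose running count reaches M (same first-to-reach-max tie-break).
import Mathlib
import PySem

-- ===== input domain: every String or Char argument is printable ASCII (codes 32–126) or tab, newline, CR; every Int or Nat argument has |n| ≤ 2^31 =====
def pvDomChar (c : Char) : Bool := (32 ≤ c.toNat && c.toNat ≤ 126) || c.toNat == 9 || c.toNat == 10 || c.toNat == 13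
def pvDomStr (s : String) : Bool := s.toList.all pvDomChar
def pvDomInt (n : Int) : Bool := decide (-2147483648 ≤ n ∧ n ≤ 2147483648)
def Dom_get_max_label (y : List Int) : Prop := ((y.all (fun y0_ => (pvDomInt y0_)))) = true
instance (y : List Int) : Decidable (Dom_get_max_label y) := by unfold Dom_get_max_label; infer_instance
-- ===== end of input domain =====

-- B replaces A's one-pass running-max tracking by two passes (count all, then find the
-- first label whose running count reaches the max count); same values, no speed claim.

-- ===== PORT A =====
-- A's loop 'for i in range(len(y))' over state (y_dict, max_num, max_val); y[0] on [] raises.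
def get_max_label (y : List Int) : Int :=
  match y with
  | [] => 0  -- unreachable under Pre_: Python raises IndexError at y[0]
  | y0 :: _ =>
    ((PySem.List.pyRange 0 (y.length : Int) 1).foldl
      (fun (st : PySem.Dict Int Int × Int × Int) i =>
        let x := PySem.List.pyGetD y i 0
        let d := st.1.insert x (st.1.getD x 0 + 1)
        let c := d.getD x 0
        if c > st.2.1 then (d, c, x) else (d, st.2.1, st.2.2))
      (PySem.Dict.empty, -1, y0)).2.2

-- ===== PORT B =====
-- second pass of Source B: running counter 'run', return first v with run[v] == M
def bLoop (M : Int) (run : PySem.Dict Int Int) : List Int → Option Int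
  | [] => none
  | v :: vs =>
    let run' := run.insert v (run.getD v 0 + 1)
    if run'.getD v 0 = M then some v else bLoop M run' vs

def get_max_label_alt (y : List Int) : Int :=
  let cnt := y.foldl (fun (d : PySem.Dict Int Int) v => d.insert v (d.getD v 0 + 1)) PySem.Dict.empty
  match PySem.List.max? cnt.values (fun v => v) with
  | none => 0  -- unreachable under Pre_: Python raises ValueError at max(()) on y = []
  | some M =>
    match bLoop M PySem.Dict.empty y with
    | some v => v
    | none => 0  -- unreachable: some label's running count reaches M

-- ===== PRECONDITION & SPEC =====
-- Pre_ excludes only the empty list, on which both Pythons raise (A: IndexError, B: ValueError).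
def Pre_get_max_label (y : List Int) : Prop := y ≠ []
instance (y : List Int) : Decidable (Pre_get_max_label y) := by unfold Pre_get_max_label; infer_instance
def pvWitness_get_max_label : List Int := ([1, 2, 2, 1])

def Spec_get_max_label (y : List Int) (out : Int) : Prop := out = get_max_label_alt y
instance (y : List Int) (out : Int) : Decidable (Spec_get_max_label y out) := by unfold Spec_get_max_label; infer_instance

-- ===== CLAIM (what is proved, stated in full; the proofs are below) =====
def Claim_equal_get_max_label : Prop := ∀ (y : List Int), Dom_get_max_label y → Pre_get_max_label y → Spec_get_max_label y (get_max_label y)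

-- ===== LEMMAS AND PROOFS =====

-- pure (dict-free) version of A's loop: p is the processed prefix
def aPure : List Int → List Int → Int → Int → Int
  | [], _, _, mv => mv
  | x :: xs, p, mn, mv =>
    if ((p.count x : Int) + 1) > mn then aPure xs (p ++ [x]) ((p.count x : Int) + 1) x
    else aPure xs (p ++ [x]) mn mv

-- pure version of Source B's second pass: first x whose inclusive prefix count equals M
def fr (M : Int) : List Int → List Int → Option Int
  | _, [] => none
  | p, x :: xs => if ((p.count x : Int) + 1) = M then some x else fr M (p ++ [x]) xs

lemma foldl_eq_aPure (xs p : List Int) (d : PySem.Dict Int Int) (mn mv : Int)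
    (hd : ∀ z, d.getD z 0 = (p.count z : Int)) :
    (xs.foldl
      (fun (st : PySem.Dict Int Int × Int × Int) x =>
        let d := st.1.insert x (st.1.getD x 0 + 1)
        let c := d.getD x 0
        if c > st.2.1 then (d, c, x) else (d, st.2.1, st.2.2))
      (d, mn, mv)).2.2 = aPure xs p mn mv := by
  induction xs generalizing p d mn mv with
  | nil => simp [aPure]
  | cons x xs ih =>
    have hx : (d.insert x (d.getD x 0 + 1)).getD x 0 = (p.count x : Int) + 1 := by
      rw [PySem.Dict.getD_insert_self, hd]
    have hd' : ∀ z, (d.insert x (d.getD x 0 + 1)).getD z 0 = (((p ++ [x]).count z : Int)) := by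
      intro z
      by_cases hz : z = x
      · subst hz; rw [hx]; simp
      · rw [PySem.Dict.getD_insert_of_ne _ _ _ hz, hd]
        have hz' : ¬ x = z := fun h => hz h.symm
        simp [List.count_append, hz']
    simp only [List.foldl_cons, aPure]
    rw [hx]
    by_cases hgt : ((p.count x : Int) + 1) > mn
    · simp only [hgt, if_pos]
      exact ih (p ++ [x]) _ _ _ hd'
    · simp only [hgt, if_false]
      exact ih (p ++ [x]) _ _ _ hd'

lemma bLoop_eq_fr (M : Int) (xs p : List Int) (run : PySem.Dict Int Int)
    (hd : ∀ z, run.getD z 0 = (p.count z : Int)) :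
    bLoop M run xs = fr M p xs := by
  induction xs generalizing p run with
  | nil => rfl
  | cons x xs ih =>
    have hx : (run.insert x (run.getD x 0 + 1)).getD x 0 = (p.count x : Int) + 1 := by
      rw [PySem.Dict.getD_insert_self, hd]
    have hd' : ∀ z, (run.insert x (run.getD x 0 + 1)).getD z 0 = (((p ++ [x]).count z : Int)) := by
      intro z
      by_cases hz : z = x
      · subst hz; rw [hx]; simp
      · rw [PySem.Dict.getD_insert_of_ne _ _ _ hz, hd]
        have hz' : ¬ x = z := fun h => hz h.symm
        simp [List.count_append, hz']
    simp only [bLoop, fr, hx]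
    by_cases he : ((p.count x : Int) + 1) = M
    · simp [he]
    · simp only [he, if_false]
      exact ih (p ++ [x]) _ hd'

-- once fr fires, any extension fires the same
lemma fr_append_some (M : Int) (l : List Int) :
    ∀ (q r : List Int) (v : Int), fr M q l = some v → fr M q (l ++ r) = some v := by
  induction l with
  | nil => intro q r v h; simp [fr] at h
  | cons x l ih =>
    intro q r v h
    rw [List.cons_append]
    simp only [fr] at h ⊢
    by_cases he : ((q.count x : Int) + 1) = M
    · simp only [he, if_pos] at h ⊢; exact h
    · simp only [he, if_false] at h ⊢
      exact ih _ _ _ h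

-- fr skips a block of elements all of whose counts stay strictly below M
lemma fr_skip (M : Int) (l : List Int) :
    ∀ (q r : List Int), (∀ z, ((q ++ l).count z : Int) < M) →
    fr M q (l ++ r) = fr M (q ++ l) r := by
  induction l with
  | nil => intro q r _; simp
  | cons x l ih =>
    intro q r h
    have hne : ((q.count x : Int) + 1) ≠ M := by
      have h1 : q.count x + 1 ≤ (q ++ x :: l).count x := by
        simp [List.count_append]
      have := h x
      push_cast at this ⊢
      omega
    simp only [List.cons_append, fr, hne, if_false]
    have : fr M (q ++ [x]) (l ++ r) = fr M ((q ++ [x]) ++ l) r := by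
      apply ih
      intro z
      have := h z
      simpa [List.count_append, List.count_cons] using this
    rw [this]
    simp

-- main invariant: along A's scan, mn is the max count of the prefix p, achieved,
-- and mv is the first label to have reached count mn; this persists and yields fr.
lemma main_inv (xs : List Int) :
    ∀ (p : List Int) (mn mv : Int),
    1 ≤ mn →
    (∀ z, ((p.count z : Int)) ≤ mn) →
    (∃ z, ((p.count z : Int)) = mn) →
    fr mn [] p = some mv →
    ∃ M', (∀ z, (((p ++ xs).count z : Int)) ≤ M') ∧
          (∃ z, (((p ++ xs).count z : Int)) = M') ∧
          fr M' [] (p ++ xs) = some (aPure xs p mn mv) := by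
  induction xs with
  | nil =>
    intro p mn mv h1 hub hach hfr
    exact ⟨mn, by simpa using hub, by simpa using hach, by simpa [aPure] using hfr⟩
  | cons x xs ih =>
    intro p mn mv h1 hub hach hfr
    by_cases hgt : ((p.count x : Int) + 1) > mn
    · -- new record: mn' = count p x + 1, mv' = x
      have hub' : ∀ z, (((p ++ [x]).count z : Int)) ≤ (p.count x : Int) + 1 := by
        intro z
        by_cases hz : z = x
        · subst hz; simp [List.count_append]
        · have := hub z
          have hz' : ¬ x = z := fun h => hz h.symm
          have hcnt : (p ++ [x]).count z = p.count z := by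
            simp [List.count_append, hz']
          rw [hcnt]
          omega
      have hach' : ∃ z, (((p ++ [x]).count z : Int)) = (p.count x : Int) + 1 :=
        ⟨x, by simp [List.count_append]⟩
      have hfr' : fr ((p.count x : Int) + 1) [] (p ++ [x]) = some x := by
        have hsk := fr_skip ((p.count x : Int) + 1) p [] [x]
          (by intro z; have := hub z; simpa using lt_of_le_of_lt this hgt)
        simp only [List.nil_append] at hsk
        rw [hsk]
        simp [fr]
      have := ih (p ++ [x]) ((p.count x : Int) + 1) x (by omega) hub' hach' hfr'
      simpa [aPure, hgt] using this
    · -- no new record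
      have hub' : ∀ z, (((p ++ [x]).count z : Int)) ≤ mn := by
        intro z
        by_cases hz : z = x
        · subst hz
          have hcnt : (p ++ [z]).count z = p.count z + 1 := by
            simp [List.count_append]
          rw [hcnt]
          push_cast
          omega
        · have hz' : ¬ x = z := fun h => hz h.symm
          have hcnt : (p ++ [x]).count z = p.count z := by
            simp [List.count_append, hz']
          rw [hcnt]
          exact hub z
      have hach' : ∃ z, (((p ++ [x]).count z : Int)) = mn := by
        obtain ⟨z, hz⟩ := hach
        have hzx : ¬ x = z := by
          intro h
          rw [← h] at hz
          omega
        exact ⟨z, by simp [List.count_append, hzx, hz]⟩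
      have hfr' : fr mn [] (p ++ [x]) = some mv := fr_append_some mn p [] [x] mv hfr
      have := ih (p ++ [x]) mn mv h1 hub' hach' hfr'
      simpa [aPure, hgt] using this

lemma empty_getD (z : Int) : (PySem.Dict.empty : PySem.Dict Int Int).getD z 0 = (([] : List Int).count z : Int) := by
  simp [PySem.Dict.empty, PySem.Dict.getD, PySem.Dict.get?]

-- ===== VERDICT (by name: the statement is the Claim_ definition above) =====
theorem get_max_label_spec : Claim_equal_get_max_label := by
  intro y _ hpre
  unfold Spec_get_max_label
  obtain ⟨y0, ys, rfl⟩ : ∃ a l, y = a :: l := by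
    cases y with
    | nil => exact absurd rfl hpre
    | cons a l => exact ⟨a, l, rfl⟩
  -- A's dict loop = the pure scan aPure
  have hA : get_max_label (y0 :: ys) = aPure (y0 :: ys) [] (-1) y0 := by
    have hrange := PySem.List.foldl_pyRange_zero_pyGetD' (y0 :: ys) (0 : Int)
      (fun (st : PySem.Dict Int Int × Int × Int) x =>
        let d := st.1.insert x (st.1.getD x 0 + 1)
        let c := d.getD x 0
        if c > st.2.1 then (d, c, x) else (d, st.2.1, st.2.2))
      (PySem.Dict.empty, -1, y0)
    calc get_max_label (y0 :: ys)
        = ((y0 :: ys).foldl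
            (fun (st : PySem.Dict Int Int × Int × Int) x =>
              let d := st.1.insert x (st.1.getD x 0 + 1)
              let c := d.getD x 0
              if c > st.2.1 then (d, c, x) else (d, st.2.1, st.2.2))
            (PySem.Dict.empty, -1, y0)).2.2 := congrArg (·.2.2) hrange
      _ = aPure (y0 :: ys) [] (-1) y0 :=
            foldl_eq_aPure (y0 :: ys) [] PySem.Dict.empty (-1) y0 empty_getD
  have hstep : aPure (y0 :: ys) [] (-1) y0 = aPure ys [y0] 1 y0 := by
    norm_num [aPure]
  -- the invariant, started after A's first step
  have hub0 : ∀ z, ((List.count z [y0] : Int)) ≤ 1 := by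
    intro z
    exact_mod_cast Nat.le_trans (List.count_le_length) (by simp)
  have hach0 : ∃ z, ((List.count z [y0] : Int)) = 1 := ⟨y0, by simp⟩
  have hfr0 : fr 1 [] [y0] = some y0 := by norm_num [fr]
  obtain ⟨M', hub, hach, hfrM⟩ := main_inv ys [y0] 1 y0 (le_refl 1) hub0 hach0 hfr0
  have hfrM' : fr M' [] (y0 :: ys) = some (aPure ys [y0] 1 y0) := hfrM
  have hubM' : ∀ z, ((List.count z (y0 :: ys) : Int)) ≤ M' := hub
  have hachM' : ∃ z, ((List.count z (y0 :: ys) : Int)) = M' := hach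
  -- B's first pass: the counter dict and its values
  have hcnt : (y0 :: ys).foldl
      (fun (d : PySem.Dict Int Int) v => d.insert v (d.getD v 0 + 1)) PySem.Dict.empty
      = PySem.Dict.counter (y0 :: ys) :=
    PySem.Dict.foldl_insert_getD_add_one_eq_counter _
  have hvals : (PySem.Dict.counter (y0 :: ys)).values
      = (PySem.Set.ofList (y0 :: ys)).map (fun k => ((List.count k (y0 :: ys) : Int))) := by
    rw [PySem.Dict.values_eq_map_keys _ (PySem.Dict.nodup_keys_counter _) 0,
      PySem.Dict.keys_counter]
    simp only [PySem.Dict.getD_counter]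
  cases hM : PySem.List.max? ((PySem.Dict.counter (y0 :: ys)).values) (fun v => v) with
  | none =>
    exfalso
    rw [PySem.List.max?_eq_none_iff, hvals, List.map_eq_nil_iff] at hM
    have hy0 : y0 ∈ PySem.Set.ofList (y0 :: ys) :=
      (PySem.Set.mem_ofList _ _).2 (List.mem_cons_self)
    rw [hM] at hy0
    exact (List.not_mem_nil) hy0
  | some M =>
    -- M is the max count: achieved and an upper bound
    have hmem := PySem.List.max?_mem hM
    rw [hvals] at hmem
    obtain ⟨k, hk, hkM⟩ := List.mem_map.1 hmem
    have hky : k ∈ (y0 :: ys) := (PySem.Set.mem_ofList _ _).1 hk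
    have hMpos : (1 : Int) ≤ M := by
      have : 0 < List.count k (y0 :: ys) := List.count_pos_iff.2 hky
      omega
    have hubM : ∀ z, ((List.count z (y0 :: ys) : Int)) ≤ M := by
      intro z
      by_cases hz : z ∈ (y0 :: ys)
      · have hzmem : ((List.count z (y0 :: ys) : Int)) ∈ (PySem.Dict.counter (y0 :: ys)).values := by
          rw [hvals]
          exact List.mem_map.2 ⟨z, (PySem.Set.mem_ofList _ _).2 hz, rfl⟩
        exact PySem.List.max?_isMax hM _ hzmem
      · rw [List.count_eq_zero_of_not_mem hz]
        omega
    -- hence M is A's final running max M'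
    have hMM' : M = M' := by
      obtain ⟨z', hz'⟩ := hachM'
      have h1 := hubM' k
      have h2 := hubM z'
      omega
    -- evaluate B
    have hB : get_max_label_alt (y0 :: ys) = aPure ys [y0] 1 y0 := by
      show (match PySem.List.max? (((y0 :: ys).foldl
          (fun (d : PySem.Dict Int Int) v => d.insert v (d.getD v 0 + 1))
          PySem.Dict.empty).values) (fun v => v) with
        | none => (0 : Int)
        | some M =>
          match bLoop M PySem.Dict.empty (y0 :: ys) with
          | some v => v
          | none => 0) = aPure ys [y0] 1 y0
      rw [hcnt, hM]
      have hb : bLoop M PySem.Dict.empty (y0 :: ys) = fr M [] (y0 :: ys) :=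
        bLoop_eq_fr M (y0 :: ys) [] PySem.Dict.empty empty_getD
      show (match bLoop M PySem.Dict.empty (y0 :: ys) with
        | some v => v
        | none => (0 : Int)) = aPure ys [y0] 1 y0
      rw [hb, hMM', hfrM']
    rw [hA, hstep, hB]
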